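/- GENERATED by mk_final_copies.py from the proof of the farm's unit `vorbis_alloc` (farm:vorbis_alloc.2: Proof.lean) as the
   re-elaboration sweep compiled it — do not edit. -/
import Vorbis.Spec.Units.vorbis_alloc

open X86 X86.User Asan Vorbis

set_option maxRecDepth 4000
set_option maxHeartbeats 4000000

namespace Vorbis.Spec.vorbis_alloc

/-- The size argument that `mov esi, 0x710` passes to `setup_malloc`, read the way `setup_malloc`'s contract reads a C `int`
(unsigned, modulo 2^32): `sizeof(stb_vorbis) = 1808`. -/
theorem size_arg (r : Word) (h : r = Word.ofBV 1808#32) : r.toNat % 2 ^ 32 = Off.sizeof.stb_vorbis := by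
  subst h
  decide

end Vorbis.Spec.vorbis_alloc

/-- `vorbis_alloc(f)` satisfies its contract: `sub rsp, 8 ; mov esi, 0x710 ; call setup_malloc ; add rsp, 8 ; ret`. The callee's
precondition is ours (its stack pointer is 16 lower, the pushed return address lies off `*f`); its postcondition at `n = 1808` is
ours, with the shadow clause raised from the callee's `top` (`rsp − 8`) to ours (`rsp + 8`). -/
theorem Vorbis.Spec.Worked.vorbis_alloc_ok : Vorbis.Spec.vorbis_alloc.Statement := by
  intro Lay hLay μ hμ u₀ hcode hsm others frames A u ret he hpre
  v_entry he
  have hsm' := hsm others frames A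
  have hsh : ShadowPre others frames u := hpre.shadow
  have hsp := hsh.rsp
  -- where `*f` is: one arithmetic fact (in the data space, off the text, off this function's stack)
  have hwhere := hpre.obj.where_ hsh.inv hsh.offText (by omega)
  -- 0x109080 … 0x109089 (stb_vorbis_fixed.c:4362): `sub rsp, 8 ; mov esi, 0x710 ; call setup_malloc`
  u_walk hcode [hμ.vendor] span [Vorbis.L.textLo, Vorbis.L.textHi] side (v_side)
  case call_inv => v_inv
  case pre_109089 =>
    -- the callee's precondition `ArenaPre A others frames s_109089`, from ours
    have c_rdi : s_109089.reg .rdi = u.reg .rdi := w_kept.get .rdi rfl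
    refine ⟨?_, ?_, ?_, hpre.offText⟩
    · -- the shadow clause: the stack pointer is 16 lower, the return address went to the stack
      refine hsh.callee ?_ ?_ ?_ ?_
      · v_untouched
      · rw [w_rsp]
        u_omega
      · rw [w_rsp]
        u_omega
      · rw [w_rsp]
        u_omega
    · -- OB1: the same `f`
      rw [c_rdi]
      exact hpre.obj
    · -- ArenaOK: only the four arena fields of `*f` are read, the return address was stored off `*f`
      rw [c_rdi]
      refine hpre.arena.frame ?_ ?_
      · simp only [Vorbis.Off.sizeof.stb_vorbis]
        omega
      · simp only [Vorbis.Off.stb_vorbis.alloc, Vorbis.Off.stb_vorbis.temp_offset]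
        rw [w_mem]
        u_eqon
  -- 0x10908e (the cut point after the call): what `setup_malloc`'s contract says, in terms of OUR entry state
  v_after_call w_rsp_109089 w_mem_109089
  have c_rdi : s_109089.reg .rdi = u.reg .rdi := w_kept_109089.get .rdi rfl
  have c_rsi : (s_109089.reg .rsi).toNat % 2 ^ 32 = Off.sizeof.stb_vorbis :=
    Vorbis.Spec.vorbis_alloc.size_arg _ w_rsi_109089
  -- the callee's footprint as a literal list over our entry state: same `f`, `n = 1808`, the shadow span as numbers
  simp only [c_rdi, c_rsi, Asan.shadowSpan, Vorbis.Off.sizeof.stb_vorbis] at w_same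
  have hs0 : UInt64.ofNat (s_109089r.mem.readLE (u.reg .rsp) 8) = ret := by
    u_frame he_retAddr
  -- the result register: named, so that the walk carries it to the `ret`
  obtain ⟨z, w_rax⟩ : ∃ z, s_109089r.reg .rax = z := ⟨_, rfl⟩
  -- `setup_malloc`'s post at `n = 1808`, `f` = our rdi
  have hpost : (Spec.setup_malloc.spec others frames A).post s_109089 s_109089r := w_post
  simp only [Spec.setup_malloc.spec, c_rdi, c_rsi, w_rax] at hpost
  obtain ⟨hfit, hnofit⟩ := hpost
  -- the callee's `top` is its entry rsp + 8 = our rsp − 8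
  have c_top : (s_109089.reg .rsp).toNat + 8 = (u.reg .rsp).toNat - 8 := by
    rw [w_rsp_109089]
    u_omega
  -- 0x10908e … 0x109092 (stb_vorbis_fixed.c:4364): `add rsp, 8 ; ret`
  u_walk hcode [hμ.vendor] span [Vorbis.L.textLo, Vorbis.L.textHi] side (v_side)
  refine ReachVia.done ?_
  v_returned
  · -- the post: `setup_malloc`'s, with the shadow clause raised to our `top`
    show (A.Fits Off.sizeof.stb_vorbis → _) ∧ (¬ A.Fits Off.sizeof.stb_vorbis → _)
    rw [w_mem, w_rax]
    refine ⟨?_, ?_⟩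
    · -- success: the new block
      intro hF
      obtain ⟨hrax, harena, hinv⟩ := hfit hF
      refine ⟨hrax, harena, ?_⟩
      rw [c_top] at hinv
      refine hinv.raise (by omega) hsp.2.2 hsp.2.1 ?_
      intro bF hbF
      exact (hsh.inv.stack.active bF hbF).2.2.1
    · -- failure: NULL, nothing changed but the return address slot below our stack pointer
      intro hF
      obtain ⟨hrax, harena, hun, _⟩ := hnofit hF
      refine ⟨hrax, harena, ?_⟩
      have hun0 : ShadowUntouched u.mem s_109089.mem := by
        rw [w_mem_109089]
        unfold Asan.ShadowUntouched
        u_eqon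
      exact Mem.EqOn.trans hun0 hun
  · -- the footprint: the callee's, plus the return address slot in our own frame
    simp only [X86.User.Spec.footprint, vspec, Asan.shadowSpan, Vorbis.Off.sizeof.stb_vorbis]
    rw [w_mem]
    u_same
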